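-- pv_equiv track=rewrite | github.com/jeeutai/ChessJaeGuk | friends.py | get_friendship_status
-- ===== SOURCE A (Python) =====
-- def get_friendship_status(user_id, friend_id, friends_data):
--     """두 사용자 간의 친구 관계 상태 확인"""
--     # 이미 친구인지 확인
--     for friendship in friends_data:
--         if ((friendship['user_id'] == user_id and friendship['friend_id'] == friend_id) or
--             (friendship['user_id'] == friend_id and friendship['friend_id'] == user_id)) and friendship['status'] == 'accepted':
--             return 'friend'
--
--     # 친구 요청을 보냈는지 확인
--     for friendship in friends_data:
--         if friendship['user_id'] == user_id and friendship['friend_id'] == friend_id and friendship['status'] == 'pending':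
--             return 'sent'
--
--     # 친구 요청을 받았는지 확인
--     for friendship in friends_data:
--         if friendship['user_id'] == friend_id and friendship['friend_id'] == user_id and friendship['status'] == 'pending':
--             return 'received'
--
--     return 'none'
-- ===== SOURCE B (Python) =====
-- def get_friendship_status(user_id, friend_id, friends_data):
--     """두 사용자 간의 친구 관계 상태 확인 — single pass, accumulate flags, resolve by priority."""
--     is_friend = False
--     has_sent = False
--     has_received = False
--     for f in friends_data:
--         u, v, s = f['user_id'], f['friend_id'], f['status']
--         if ((u == user_id and v == friend_id) or (u == friend_id and v == user_id)) and s == 'accepted':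
--             is_friend = True
--         if u == user_id and v == friend_id and s == 'pending':
--             has_sent = True
--         if u == friend_id and v == user_id and s == 'pending':
--             has_received = True
--     if is_friend:
--         return 'friend'
--     if has_sent:
--         return 'sent'
--     if has_received:
--         return 'received'
--     return 'none'
-- ===== Notes on version B (the rewrite author's own statement) =====
-- stated objective: simpler
-- what changed: Replaces A's three separate early-returning scans over friends_data by a single pass that accumulates three booleans (is_friend/has_sent/has_received) and then resolves them in priority order friend > sent > received > none.
-- outside the precondition, e.g. on get_friendship_status('a', 'b', [{'user_id': 'x'}]): A returns 'none', B raises KeyError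
import Mathlib
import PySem

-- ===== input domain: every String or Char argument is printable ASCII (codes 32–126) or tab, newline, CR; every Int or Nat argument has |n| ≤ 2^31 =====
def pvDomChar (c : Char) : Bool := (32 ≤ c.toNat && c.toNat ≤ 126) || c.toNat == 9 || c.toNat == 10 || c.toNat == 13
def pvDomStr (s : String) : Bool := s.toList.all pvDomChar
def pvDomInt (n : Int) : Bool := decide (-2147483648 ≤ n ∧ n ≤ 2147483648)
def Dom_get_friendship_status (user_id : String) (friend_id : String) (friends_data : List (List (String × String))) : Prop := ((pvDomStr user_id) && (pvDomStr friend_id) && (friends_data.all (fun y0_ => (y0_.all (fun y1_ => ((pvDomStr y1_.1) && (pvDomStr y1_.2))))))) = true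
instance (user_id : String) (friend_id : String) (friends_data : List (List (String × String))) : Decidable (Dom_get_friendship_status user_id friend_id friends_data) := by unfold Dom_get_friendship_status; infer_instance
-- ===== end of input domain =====

-- B changes A's three early-returning scans into one accumulate-flags pass plus a priority resolution (objective: simpler).

-- ===== PORT A =====
-- dict lookup (first match); the "" default is unreachable inside Pre_ (all three keys present)
def pvGet (d : List (String × String)) (k : String) : String :=
  match d with
  | [] => ""
  | p :: rest => if p.1 == k then p.2 else pvGet rest k

-- first loop of A: early return 'friend'
def pvA_loop1 (user_id friend_id : String) : List (List (String × String)) → Bool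
  | [] => false
  | f :: rest =>
    if (((pvGet f "user_id" == user_id) && (pvGet f "friend_id" == friend_id)) ||
        ((pvGet f "user_id" == friend_id) && (pvGet f "friend_id" == user_id))) &&
       (pvGet f "status" == "accepted")
    then true else pvA_loop1 user_id friend_id rest

-- second loop of A: early return 'sent'
def pvA_loop2 (user_id friend_id : String) : List (List (String × String)) → Bool
  | [] => false
  | f :: rest =>
    if (pvGet f "user_id" == user_id) && (pvGet f "friend_id" == friend_id) &&
       (pvGet f "status" == "pending")
    then true else pvA_loop2 user_id friend_id rest

-- third loop of A: early return 'received'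
def pvA_loop3 (user_id friend_id : String) : List (List (String × String)) → Bool
  | [] => false
  | f :: rest =>
    if (pvGet f "user_id" == friend_id) && (pvGet f "friend_id" == user_id) &&
       (pvGet f "status" == "pending")
    then true else pvA_loop3 user_id friend_id rest

def get_friendship_status (user_id : String) (friend_id : String) (friends_data : List (List (String × String))) : String :=
  if pvA_loop1 user_id friend_id friends_data then "friend"
  else if pvA_loop2 user_id friend_id friends_data then "sent"
  else if pvA_loop3 user_id friend_id friends_data then "received"
  else "none"

-- ===== PORT B =====
-- single pass: fold accumulating (is_friend, has_sent, has_received)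
def pvB_flags (user_id friend_id : String) (friends_data : List (List (String × String))) : Bool × Bool × Bool :=
  friends_data.foldl (fun acc f =>
    let u := pvGet f "user_id"
    let v := pvGet f "friend_id"
    let s := pvGet f "status"
    ( acc.1 || (((u == user_id && v == friend_id) || (u == friend_id && v == user_id)) && s == "accepted"),
      acc.2.1 || (u == user_id && v == friend_id && s == "pending"),
      acc.2.2 || (u == friend_id && v == user_id && s == "pending")))
    (false, false, false)

def get_friendship_status_alt (user_id : String) (friend_id : String) (friends_data : List (List (String × String))) : String :=
  let fl := pvB_flags user_id friend_id friends_data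
  if fl.1 then "friend"
  else if fl.2.1 then "sent"
  else if fl.2.2 then "received"
  else "none"

-- ===== PRECONDITION & SPEC =====
-- Pre_ excludes friendship records missing one of the keys 'user_id'/'friend_id'/'status': Python A raises
-- KeyError on the first accessed missing key (and returns only when short-circuit evaluation happens to skip
-- it, an accident of evaluation order), and B itself raises KeyError on any such record.
def Pre_get_friendship_status (user_id : String) (friend_id : String) (friends_data : List (List (String × String))) : Prop :=
  ∀ f ∈ friends_data,
    (f.any (fun p => p.1 == "user_id")) = true ∧
    (f.any (fun p => p.1 == "friend_id")) = true ∧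
    (f.any (fun p => p.1 == "status")) = true
instance (user_id : String) (friend_id : String) (friends_data : List (List (String × String))) : Decidable (Pre_get_friendship_status user_id friend_id friends_data) := by unfold Pre_get_friendship_status; infer_instance

def pvWitness_get_friendship_status : String × String × (List (List (String × String))) :=
  ("a", "b", [[("user_id", "a"), ("friend_id", "b"), ("status", "pending")]])

def Spec_get_friendship_status (user_id : String) (friend_id : String) (friends_data : List (List (String × String))) (out : String) : Prop := out = get_friendship_status_alt user_id friend_id friends_data
instance (user_id : String) (friend_id : String) (friends_data : List (List (String × String))) (out : String) : Decidable (Spec_get_friendship_status user_id friend_id friends_data out) := by unfold Spec_get_friendship_status; infer_instance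

-- ===== CLAIM (what is proved, stated in full; the proofs are below) =====
def Claim_equal_get_friendship_status : Prop := ∀ (user_id : String) (friend_id : String) (friends_data : List (List (String × String))), Dom_get_friendship_status user_id friend_id friends_data → Pre_get_friendship_status user_id friend_id friends_data → Spec_get_friendship_status user_id friend_id friends_data (get_friendship_status user_id friend_id friends_data)

-- ===== LEMMAS AND PROOFS =====
theorem pv_if_or (c x : Bool) : (if c = true then true else x) = (c || x) := by cases c <;> simp

theorem pvB_flags_eq (user_id friend_id : String) (l : List (List (String × String))) :
    ∀ acc : Bool × Bool × Bool,
      l.foldl (fun acc f =>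
        let u := pvGet f "user_id"
        let v := pvGet f "friend_id"
        let s := pvGet f "status"
        ( acc.1 || (((u == user_id && v == friend_id) || (u == friend_id && v == user_id)) && s == "accepted"),
          acc.2.1 || (u == user_id && v == friend_id && s == "pending"),
          acc.2.2 || (u == friend_id && v == user_id && s == "pending"))) acc
      = (acc.1 || pvA_loop1 user_id friend_id l,
         acc.2.1 || pvA_loop2 user_id friend_id l,
         acc.2.2 || pvA_loop3 user_id friend_id l) := by
  induction l with
  | nil => intro acc; simp [pvA_loop1, pvA_loop2, pvA_loop3]
  | cons f rest ih =>
    intro acc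
    simp only [List.foldl_cons, ih, pvA_loop1, pvA_loop2, pvA_loop3, pv_if_or, Bool.or_assoc]

theorem get_friendship_status_spec : Claim_equal_get_friendship_status := by
  intro user_id friend_id friends_data _ _
  unfold Spec_get_friendship_status get_friendship_status get_friendship_status_alt pvB_flags
  rw [pvB_flags_eq]
  simp
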